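-- pv_equiv track=rewrite | github.com/linxiexiong/kbqa_bishe | embedding/vocab.py | build_relation_dict
-- ===== SOURCE A (Python) =====
-- def build_relation_dict(relations):
--     ent_dict = {}
--     index = 0
--     for ent in relations:
--         if ent not in ent_dict:
--             ent_dict[ent] = index
--             index += 1
--     return ent_dict
-- ===== SOURCE B (Python) =====
-- def build_relation_dict(relations):
--     first = {}
--     for i, rel in reversed(list(enumerate(relations))):
--         first[rel] = i
--     return {rel: j for j, rel in enumerate(sorted(first, key=first.get))}
-- ===== Notes on version B (the rewrite author's own statement) =====
-- stated objective: alternative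
-- what changed: Replaces the fused membership-test-plus-counter loop with a last-write-wins reverse sweep that records each element's first-occurrence position (no membership test, no counter), then sorts the distinct keys by that position and enumerates them.
import Mathlib
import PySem

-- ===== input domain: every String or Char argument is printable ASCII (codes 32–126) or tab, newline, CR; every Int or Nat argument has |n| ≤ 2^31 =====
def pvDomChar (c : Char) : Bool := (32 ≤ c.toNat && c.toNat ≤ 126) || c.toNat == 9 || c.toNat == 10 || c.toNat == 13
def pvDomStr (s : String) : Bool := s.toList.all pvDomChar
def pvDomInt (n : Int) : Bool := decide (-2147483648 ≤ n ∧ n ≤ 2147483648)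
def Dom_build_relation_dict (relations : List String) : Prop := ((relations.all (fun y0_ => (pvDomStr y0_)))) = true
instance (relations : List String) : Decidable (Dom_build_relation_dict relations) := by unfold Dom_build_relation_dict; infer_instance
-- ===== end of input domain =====

-- B replaces A's fused membership-test-plus-counter loop by a last-write-wins reverse sweep
-- recording first-occurrence positions, followed by a sort of the distinct keys by position
-- and an enumeration; same return value, no speed claim.

-- ===== PORT A =====
-- fused loop: membership test, insert, manual index counter
def build_relation_dict (relations : List String) : List (String × Int) :=
  (relations.foldl
    (fun (st : PySem.Dict String Int × Int) ent =>
      if st.1.contains ent = false then (st.1.insert ent st.2, st.2 + 1) else st)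
    (PySem.Dict.empty, 0)).1.items

-- ===== PORT B =====
-- reverse sweep over enumerate(relations) with overwriting (last write = first occurrence),
-- then sorted(first, key=first.get) — key ported as getD (exact: every key sorted is in first)
def build_relation_dict_alt (relations : List String) : List (String × Int) :=
  let first := ((PySem.List.enumerate relations).reverse).foldl
    (fun (d : PySem.Dict String Int) p => d.insert p.2 p.1) PySem.Dict.empty
  (PySem.List.enumerate
    (PySem.List.sorted first.keys (fun r => first.getD r 0) false)).map
    (fun p => (p.2, p.1))

-- ===== PRECONDITION & SPEC =====
def Spec_build_relation_dict (relations : List String) (out : List (String × Int)) : Prop := out = build_relation_dict_alt relations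
instance (relations : List String) (out : List (String × Int)) : Decidable (Spec_build_relation_dict relations out) := by unfold Spec_build_relation_dict; infer_instance

-- ===== CLAIM (what is proved, stated in full; the proofs are below) =====
def Claim_equal_build_relation_dict : Prop := ∀ (relations : List String), Dom_build_relation_dict relations → Spec_build_relation_dict relations (build_relation_dict relations)

-- ===== LEMMAS AND PROOFS =====

-- the common target: the distinct elements s, enumerated, keys first
def pvEmap (s : List String) : List (String × Int) :=
  (PySem.List.enumerate s).map (fun p => (p.2, p.1))

lemma pvEmap_keys (s : List String) : (pvEmap s).map Prod.fst = s := by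
  simp [pvEmap, Function.comp_def]

lemma pvEmap_snoc (s : List String) (x : String) :
    pvEmap (s ++ [x]) = pvEmap s ++ [(x, (s.length : Int))] := by
  simp [pvEmap, PySem.List.enumerate_append, PySem.List.enumerate_cons]

-- A's loop invariant
lemma pv_loop_invariant (xs : List String) (s : List String) :
    (xs.foldl
      (fun (st : PySem.Dict String Int × Int) ent =>
        if st.1.contains ent = false then (st.1.insert ent st.2, st.2 + 1) else st)
      (PySem.Dict.mk (pvEmap s), (s.length : Int)))
    = (PySem.Dict.mk (pvEmap (PySem.Set.update s xs)), ((PySem.Set.update s xs).length : Int)) := by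
  induction xs generalizing s with
  | nil => simp [PySem.Set.update]
  | cons x xs ih =>
    rw [List.foldl_cons, PySem.Set.update_cons]
    have hcont : (PySem.Dict.mk (pvEmap s)).contains x = decide (x ∈ s) := by
      rw [PySem.Dict.contains_eq_decide_mem_keys]
      have : (PySem.Dict.mk (pvEmap s)).keys = s := by
        simpa [PySem.Dict.keys_mk] using pvEmap_keys s
      rw [this]
    by_cases hx : x ∈ s
    · have hadd : PySem.Set.add s x = s := by simp [PySem.Set.add, hx]
      simp [hcont, hx, ih]
    · have hadd : PySem.Set.add s x = s ++ [x] := by simp [PySem.Set.add, hx]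
      have h1 : (PySem.Dict.mk (pvEmap s)).insert x (s.length : Int)
          = PySem.Dict.mk (pvEmap (s ++ [x])) := by
        apply PySem.Dict.ext
        rw [PySem.Dict.items_insert_of_not_contains]
        · simp [pvEmap_snoc]
        · simp [hcont, hx]
      have hlen : ((s.length : Int) + 1) = (((s ++ [x]).length : Int)) := by simp
      simp only [hcont, hx, decide_false, if_true, h1, hlen, hadd]
      exact ih (s ++ [x])

lemma a_eq_pvEmap (relations : List String) :
    build_relation_dict relations = pvEmap (PySem.List.dedup relations) := by
  unfold build_relation_dict
  have h0 : (PySem.Dict.empty : PySem.Dict String Int) = PySem.Dict.mk (pvEmap []) := rfl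
  rw [h0]
  have := pv_loop_invariant relations []
  simp only [List.length_nil, Int.ofNat_zero] at this
  rw [this, PySem.Set.update_nil_left, ← PySem.List.dedup_eq_ofList]

-- B's reverse sweep, with a generalized enumerate start
def pvH (s : Int) (l : List String) : PySem.Dict String Int :=
  ((PySem.List.enumerate l s).reverse).foldl
    (fun (d : PySem.Dict String Int) p => d.insert p.2 p.1) PySem.Dict.empty

lemma pvH_cons (s : Int) (x : String) (xs : List String) :
    pvH s (x :: xs) = (pvH (s + 1) xs).insert x s := by
  simp [pvH, PySem.List.enumerate_cons, List.foldl_append]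

lemma pvH_mem_keys (s : Int) (l : List String) (r : String) :
    r ∈ (pvH s l).keys ↔ r ∈ l := by
  induction l generalizing s with
  | nil => simp [pvH, PySem.List.enumerate_nil, PySem.Dict.keys_empty]
  | cons x xs ih =>
    rw [pvH_cons, PySem.Dict.mem_keys_insert, ih]
    simp

lemma pvH_nodup_keys (s : Int) (l : List String) : (pvH s l).keys.Nodup := by
  unfold pvH
  exact PySem.Dict.nodup_keys_foldl_insert_key ((PySem.List.enumerate l s).reverse)
    (fun (p : Int × String) => p.2) (fun d p => p.1) PySem.Dict.empty
    PySem.Dict.nodup_keys_empty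

lemma pvH_getD (s : Int) (l : List String) (r : String) (h : r ∈ l) :
    (pvH s l).getD r 0 = s + (l.idxOf r : Int) := by
  induction l generalizing s with
  | nil => simp at h
  | cons x xs ih =>
    rw [pvH_cons, PySem.Dict.getD_insert]
    by_cases hr : r = x
    · subst hr; simp
    · rw [if_neg hr]
      have hm : r ∈ xs := by
        rcases List.mem_cons.mp h with h' | h'
        · exact absurd h' hr
        · exact h'
      rw [ih (s + 1) hm, List.idxOf_cons_ne xs (fun e => hr e.symm)]
      push_cast
      ring

-- the distinct elements in first-occurrence order are strictly increasing in first index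
lemma dedup_pairwise_idxOf (l : List String) :
    (PySem.List.dedup l).Pairwise (fun a b => (l.idxOf a : Int) < (l.idxOf b : Int)) := by
  induction l using List.reverseRecOn with
  | nil => simp [PySem.List.dedup]
  | append_singleton l x ih =>
    have hded : PySem.List.dedup (l ++ [x]) = PySem.Set.add (PySem.List.dedup l) x := by
      rw [PySem.List.dedup_eq_ofList, PySem.List.dedup_eq_ofList,
        PySem.Set.ofList_eq_foldl, PySem.Set.ofList_eq_foldl, List.foldl_append]
      rfl
    have hidx : ∀ a ∈ PySem.List.dedup l, (l ++ [x]).idxOf a = l.idxOf a := by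
      intro a ha
      exact List.idxOf_append_of_mem ((PySem.List.mem_dedup _ _).mp ha)
    have hpw : (PySem.List.dedup l).Pairwise
        (fun a b => ((l ++ [x]).idxOf a : Int) < ((l ++ [x]).idxOf b : Int)) := by
      refine List.Pairwise.imp_of_mem (fun {a b} ha hb hab => ?_) ih
      rw [hidx a ha, hidx b hb]; exact hab
    rw [hded]
    by_cases hxl : x ∈ l
    · have hx : x ∈ PySem.List.dedup l := (PySem.List.mem_dedup _ _).mpr hxl
      have : PySem.Set.add (PySem.List.dedup l) x = PySem.List.dedup l := by
        simp [PySem.Set.add, hxl]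
      rw [this]
      exact hpw
    · have hx : x ∉ PySem.List.dedup l := fun h => hxl ((PySem.List.mem_dedup _ _).mp h)
      have : PySem.Set.add (PySem.List.dedup l) x = PySem.List.dedup l ++ [x] := by
        simp [PySem.Set.add, hxl]
      rw [this, List.pairwise_append]
      refine ⟨hpw, by simp, ?_⟩
      intro a ha b hb
      have hb' : b = x := by simpa using hb
      rw [hb']
      have hal : a ∈ l := (PySem.List.mem_dedup _ _).mp ha
      rw [hidx a ha]
      have h1 : (l ++ [x]).idxOf x = l.length := by
        simp [List.idxOf_append, hxl]
      rw [h1]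
      exact_mod_cast List.idxOf_lt_length_of_mem hal

lemma b_eq_pvEmap (relations : List String) :
    build_relation_dict_alt relations = pvEmap (PySem.List.dedup relations) := by
  show (PySem.List.enumerate
      (PySem.List.sorted (pvH 0 relations).keys
        (fun r => (pvH 0 relations).getD r 0) false)).map (fun p => (p.2, p.1))
    = pvEmap (PySem.List.dedup relations)
  have hsorted : PySem.List.sorted (pvH 0 relations).keys
      (fun r => (pvH 0 relations).getD r 0) false = PySem.List.dedup relations := by
    apply PySem.List.sorted_eq_of_perm_of_pairwise_lt
    · rw [List.perm_ext_iff_of_nodup (PySem.List.nodup_dedup relations)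
        (pvH_nodup_keys 0 relations)]
      intro a
      rw [PySem.List.mem_dedup, pvH_mem_keys]
    · refine List.Pairwise.imp_of_mem (fun {a b} ha hb hab => ?_) (dedup_pairwise_idxOf relations)
      have ha' : a ∈ relations := (PySem.List.mem_dedup _ _).mp ha
      have hb' : b ∈ relations := (PySem.List.mem_dedup _ _).mp hb
      rw [pvH_getD 0 relations a ha', pvH_getD 0 relations b hb']
      omega
  rw [hsorted]
  rfl

-- ===== VERDICT =====
theorem build_relation_dict_spec : Claim_equal_build_relation_dict := by
  intro relations _
  unfold Spec_build_relation_dict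
  rw [a_eq_pvEmap, b_eq_pvEmap]
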